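-- pv_equiv track=rewrite | github.com/madsthoisen/advent_of_code | 2023/dec22/solution.py | stable
-- ===== SOURCE A (Python) =====
-- def get_occupied(bb):
--     occupied = set()
--     for (x1, y1, z1), (x2, y2, z2) in bb:
--         for x in range(x1, x2 + 1):
--             for y in range(y1, y2 + 1):
--                 for z in range(z1, z2 + 1):
--                     occupied.add((x, y, z))
--     return occupied
--
-- def stable(bb):
--     occupied = get_occupied(bb)
--     bb = sorted(bb, key=lambda x: x[0][2])
--     for (x1, y1, z1), (x2, y2, z2) in bb:
--         if z1 - 1 > 0:
--             fills = {(x, y, z1 - 1) for x in range(x1, x2 + 1) for y in range(y1, y2 + 1)}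
--             if len(fills & occupied) == 0:
--                 return False
--     return True
-- ===== SOURCE B (Python) =====
-- def stable(bb):
--     # A brick is supported iff some brick's cells intersect the plane z1-1
--     # under its footprint: pure interval-overlap tests, no cell enumeration.
--     for (x1, y1, z1), (x2, y2, z2) in bb:
--         if z1 > 1:
--             if not any(
--                 max(x1, a1) <= min(x2, a2)
--                 and max(y1, b1) <= min(y2, b2)
--                 and c1 <= z1 - 1 <= c2
--                 for (a1, b1, c1), (a2, b2, c2) in bb
--             ):
--                 return False
--     return True
-- ===== Notes on version B (the rewrite author's own statement) =====
-- stated objective: faster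
-- what changed: Instead of enumerating every occupied 3D cell into a set and intersecting each brick's footprint plane with it, B decides support by pairwise axis-interval overlap tests between bricks, never materialising any cells.
import Mathlib
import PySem

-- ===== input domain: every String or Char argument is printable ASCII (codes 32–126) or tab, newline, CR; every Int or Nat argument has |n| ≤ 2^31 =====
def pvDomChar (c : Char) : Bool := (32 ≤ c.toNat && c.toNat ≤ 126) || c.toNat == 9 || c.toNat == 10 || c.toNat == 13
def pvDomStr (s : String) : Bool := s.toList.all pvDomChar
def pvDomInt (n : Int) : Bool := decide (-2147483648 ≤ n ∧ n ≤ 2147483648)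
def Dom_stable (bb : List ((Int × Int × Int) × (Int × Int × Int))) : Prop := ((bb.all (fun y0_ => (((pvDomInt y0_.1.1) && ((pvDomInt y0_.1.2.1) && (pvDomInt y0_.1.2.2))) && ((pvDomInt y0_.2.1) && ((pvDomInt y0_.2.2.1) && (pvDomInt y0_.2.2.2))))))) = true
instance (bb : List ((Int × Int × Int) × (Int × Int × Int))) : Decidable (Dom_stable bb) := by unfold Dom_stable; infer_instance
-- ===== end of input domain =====

-- B replaces A's full 3D cell enumeration by pairwise axis-interval overlap tests (no per-cell work).


-- ===== PORT A =====
-- Python's set is represented by Std.HashSet: exact as a finite set (add/membership/len of the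
-- intersection are all A uses; no iteration order is ever consumed), with CPython-like O(1) set ops.

-- get_occupied: every cell of every brick, added into a set
def getOccupied (bb : List ((Int × Int × Int) × (Int × Int × Int))) : Std.HashSet (Int × Int × Int) :=
  bb.foldl (fun occ b =>
    (PySem.List.pyRange b.1.1 (b.2.1 + 1) 1).foldl (fun occ x =>
      (PySem.List.pyRange b.1.2.1 (b.2.2.1 + 1) 1).foldl (fun occ y =>
        (PySem.List.pyRange b.1.2.2 (b.2.2.2 + 1) 1).foldl (fun occ z =>
          occ.insert (x, y, z)) occ) occ) occ) ∅

-- the set comprehension {(x, y, z1-1) for x … for y …}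
def fillsOf (b : (Int × Int × Int) × (Int × Int × Int)) : Std.HashSet (Int × Int × Int) :=
  (PySem.List.pyRange b.1.1 (b.2.1 + 1) 1).foldl (fun s x =>
    (PySem.List.pyRange b.1.2.1 (b.2.2.1 + 1) 1).foldl (fun s y =>
      s.insert (x, y, b.1.2.2 - 1)) s) ∅

-- len(fills & occupied): the number of elements of fills that are also in occupied
def interLen (fills occ : Std.HashSet (Int × Int × Int)) : Nat :=
  fills.toList.countP (fun p => occ.contains p)

-- the main loop with its early return
def stableLoop (occ : Std.HashSet (Int × Int × Int)) :
    List ((Int × Int × Int) × (Int × Int × Int)) → Bool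
  | [] => true
  | b :: rest =>
    if b.1.2.2 - 1 > 0 then
      if interLen (fillsOf b) occ == 0 then false
      else stableLoop occ rest
    else stableLoop occ rest

def stable (bb : List ((Int × Int × Int) × (Int × Int × Int))) : Bool :=
  stableLoop (getOccupied bb) (PySem.List.sorted bb (fun b => b.1.2.2) false)

-- ===== PORT B =====
-- does brick c occupy some cell of b's footprint at height z?
def supportsAt (z : Int) (b c : (Int × Int × Int) × (Int × Int × Int)) : Bool :=
  max b.1.1 c.1.1 ≤ min b.2.1 c.2.1 && max b.1.2.1 c.1.2.1 ≤ min b.2.2.1 c.2.2.1 &&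
    c.1.2.2 ≤ z && z ≤ c.2.2.2

def stable_alt (bb : List ((Int × Int × Int) × (Int × Int × Int))) : Bool :=
  bb.all (fun b => b.1.2.2 ≤ 1 || bb.any (fun c => supportsAt (b.1.2.2 - 1) b c))

-- ===== PRECONDITION & SPEC =====
def Spec_stable (bb : List ((Int × Int × Int) × (Int × Int × Int))) (out : Bool) : Prop := out = stable_alt bb
instance (bb : List ((Int × Int × Int) × (Int × Int × Int))) (out : Bool) : Decidable (Spec_stable bb out) := by unfold Spec_stable; infer_instance

-- ===== CLAIM (what is proved, stated in full; the proofs are below) =====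
def Claim_equal_stable : Prop := ∀ (bb : List ((Int × Int × Int) × (Int × Int × Int))), Dom_stable bb → Spec_stable bb (stable bb)

-- ===== LEMMAS AND PROOFS =====

-- membership through a fold whose step is characterised by a predicate
theorem mem_foldl_step {α σ β : Type} {f : σ → α → σ} {M : σ → β → Prop} {Q : α → β → Prop}
    (hf : ∀ s a p, M (f s a) p ↔ M s p ∨ Q a p) :
    ∀ (l : List α) (s : σ) (p : β), M (l.foldl f s) p ↔ M s p ∨ ∃ a ∈ l, Q a p := by
  intro l
  induction l with
  | nil => simp
  | cons a t ih =>
    intro s p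
    simp only [List.foldl_cons, ih, hf, List.mem_cons]
    constructor
    · rintro ((h | h) | ⟨b, hb, hq⟩)
      · exact Or.inl h
      · exact Or.inr ⟨a, Or.inl rfl, h⟩
      · exact Or.inr ⟨b, Or.inr hb, hq⟩
    · rintro (h | ⟨b, rfl | hb, hq⟩)
      · exact Or.inl (Or.inl h)
      · exact Or.inl (Or.inr hq)
      · exact Or.inr ⟨b, hb, hq⟩

def cellOf (c : (Int × Int × Int) × (Int × Int × Int)) (p : Int × Int × Int) : Prop :=
  c.1.1 ≤ p.1 ∧ p.1 ≤ c.2.1 ∧ c.1.2.1 ≤ p.2.1 ∧ p.2.1 ≤ c.2.2.1 ∧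
    c.1.2.2 ≤ p.2.2 ∧ p.2.2 ≤ c.2.2.2

theorem mem_insert_iff (s : Std.HashSet (Int × Int × Int)) (x p : Int × Int × Int) :
    p ∈ s.insert x ↔ p ∈ s ∨ p = x := by
  rw [Std.HashSet.mem_insert, beq_iff_eq, eq_comm, or_comm]

theorem mem_getOccupied (bb : List ((Int × Int × Int) × (Int × Int × Int)))
    (p : Int × Int × Int) : p ∈ getOccupied bb ↔ ∃ c ∈ bb, cellOf c p := by
  unfold getOccupied
  rw [mem_foldl_step (M := fun s p => p ∈ s) (Q := fun c q =>
      ∃ x ∈ PySem.List.pyRange c.1.1 (c.2.1 + 1) 1,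
      ∃ y ∈ PySem.List.pyRange c.1.2.1 (c.2.2.1 + 1) 1,
      ∃ z ∈ PySem.List.pyRange c.1.2.2 (c.2.2.2 + 1) 1, q = (x, y, z)) ?_ bb _ p]
  · simp only [Std.HashSet.not_mem_empty, false_or]
    refine exists_congr fun c => and_congr_right fun _ => ?_
    constructor
    · rintro ⟨x, hx, y, hy, z, hz, rfl⟩
      simp only [PySem.List.mem_pyRange_one] at hx hy hz
      simp only [cellOf]
      omega
    · intro h
      simp only [cellOf] at h
      exact ⟨p.1, by rw [PySem.List.mem_pyRange_one]; omega,
             p.2.1, by rw [PySem.List.mem_pyRange_one]; omega,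
             p.2.2, by rw [PySem.List.mem_pyRange_one]; omega, rfl⟩
  · intro s c q
    dsimp only
    rw [mem_foldl_step (M := fun s p => p ∈ s) (Q := fun x q =>
        ∃ y ∈ PySem.List.pyRange c.1.2.1 (c.2.2.1 + 1) 1,
        ∃ z ∈ PySem.List.pyRange c.1.2.2 (c.2.2.2 + 1) 1, q = (x, y, z)) ?_]
    · intro s' x q'
      dsimp only
      rw [mem_foldl_step (M := fun s p => p ∈ s) (Q := fun y q =>
          ∃ z ∈ PySem.List.pyRange c.1.2.2 (c.2.2.2 + 1) 1, q = (x, y, z)) ?_]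
      · intro s'' y q''
        dsimp only
        rw [mem_foldl_step (M := fun s p => p ∈ s) (Q := fun z q => q = (x, y, z)) ?_]
        intro s3 z q3
        dsimp only
        rw [mem_insert_iff]

theorem mem_fillsOf (b : (Int × Int × Int) × (Int × Int × Int)) (p : Int × Int × Int) :
    p ∈ fillsOf b ↔ b.1.1 ≤ p.1 ∧ p.1 ≤ b.2.1 ∧ b.1.2.1 ≤ p.2.1 ∧ p.2.1 ≤ b.2.2.1 ∧
      p.2.2 = b.1.2.2 - 1 := by
  unfold fillsOf
  rw [mem_foldl_step (M := fun s p => p ∈ s) (Q := fun x q =>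
      ∃ y ∈ PySem.List.pyRange b.1.2.1 (b.2.2.1 + 1) 1, q = (x, y, b.1.2.2 - 1)) ?_]
  · simp only [Std.HashSet.not_mem_empty, false_or]
    constructor
    · rintro ⟨x, hx, y, hy, rfl⟩
      simp only [PySem.List.mem_pyRange_one] at hx hy
      dsimp only
      omega
    · intro h
      obtain ⟨h1, h2, h3, h4, h5⟩ := h
      refine ⟨p.1, by rw [PySem.List.mem_pyRange_one]; omega,
              p.2.1, by rw [PySem.List.mem_pyRange_one]; omega, ?_⟩
      rw [← h5]
  · intro s x q
    dsimp only
    rw [mem_foldl_step (M := fun s p => p ∈ s) (Q := fun y q => q = (x, y, b.1.2.2 - 1)) ?_]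
    intro s' y q'
    dsimp only
    rw [mem_insert_iff]

-- the per-brick test of A equals (the negation of) the per-brick test of B
theorem brick_test (bb : List ((Int × Int × Int) × (Int × Int × Int)))
    (b : (Int × Int × Int) × (Int × Int × Int)) :
    (interLen (fillsOf b) (getOccupied bb) == 0) =
      !(bb.any (fun c => supportsAt (b.1.2.2 - 1) b c)) := by
  rw [Bool.eq_iff_iff, beq_iff_eq, Bool.not_eq_true', List.any_eq_false]
  rw [interLen, List.countP_eq_zero]
  constructor
  · intro h c hc hs
    refine h (max b.1.1 c.1.1, max b.1.2.1 c.1.2.1, b.1.2.2 - 1) ?_ ?_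
    · rw [Std.HashSet.mem_toList, mem_fillsOf]
      simp only [supportsAt, Bool.and_eq_true, decide_eq_true_eq] at hs
      dsimp only
      exact ⟨by omega, by omega, by omega, by omega, by trivial⟩
    · rw [Std.HashSet.contains_iff_mem, mem_getOccupied]
      refine ⟨c, hc, ?_⟩
      simp only [supportsAt, Bool.and_eq_true, decide_eq_true_eq] at hs
      simp only [cellOf]
      exact ⟨by omega, by omega, by omega, by omega, by omega, by omega⟩
  · intro h p hp hocc
    rw [Std.HashSet.mem_toList, mem_fillsOf] at hp
    rw [Std.HashSet.contains_iff_mem, mem_getOccupied] at hocc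
    obtain ⟨c, hc, hcell⟩ := hocc
    refine absurd ?_ (h c hc ·)
    simp only [supportsAt, Bool.and_eq_true, decide_eq_true_eq]
    simp only [cellOf] at hcell
    omega

-- A's loop is an 'all' over the list it scans
theorem stableLoop_eq_all (occ : Std.HashSet (Int × Int × Int))
    (l : List ((Int × Int × Int) × (Int × Int × Int))) :
    stableLoop occ l = l.all (fun b =>
      if b.1.2.2 - 1 > 0 then !(interLen (fillsOf b) occ == 0) else true) := by
  induction l with
  | nil => rfl
  | cons b rest ih =>
    have hu : stableLoop occ (b :: rest) =
        if b.1.2.2 - 1 > 0 then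
          if interLen (fillsOf b) occ == 0 then false
          else stableLoop occ rest
        else stableLoop occ rest := rfl
    rw [hu, List.all_cons, ih]
    by_cases h1 : b.1.2.2 - 1 > 0
    · cases hx : (interLen (fillsOf b) occ == 0) <;> simp
    · have h1' : ¬ 1 < b.1.2.2 := by omega
      simp [h1']

-- ===== VERDICT (by name: the statement is the Claim_ definition above) =====
theorem stable_spec : Claim_equal_stable := by
  unfold Claim_equal_stable
  intro bb _
  unfold Spec_stable stable stable_alt
  rw [stableLoop_eq_all, Bool.eq_iff_iff]
  simp only [List.all_eq_true, PySem.List.mem_sorted]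
  refine forall_congr' fun b => imp_congr_right fun _ => ?_
  rw [brick_test]
  by_cases h1 : b.1.2.2 - 1 > 0
  · simp [show ¬ b.1.2.2 ≤ 1 by omega]
  · simp [show b.1.2.2 ≤ 1 by omega]
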